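-- pv_equiv track=rewrite | github.com/elenaara/adventofcode2022 | day10.py | sum_cycles
-- ===== SOURCE A (Python) =====
-- def sum_cycles(commands):
--     sum_cycle = []
--     N = []
--     cycle = 1
--     for c in commands:
--         if c[0] == 'addx':
--             cycle += 2
--             N.append(int(c[1]))
--             sum_cycle.append(cycle)
--
--         if c[0] == "noop":
--             cycle += 1
--     return N,sum_cycle
-- ===== SOURCE B (Python) =====
-- def sum_cycles(commands):
--     # prefix table of cycle positions, then select addx rows
--     cum = [1]
--     for c in commands:
--         cum.append(cum[-1] + (2 if c[0] == 'addx' else 1 if c[0] == 'noop' else 0))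
--     picked = [(c, pos) for c, pos in zip(commands, cum[1:]) if c[0] == 'addx']
--     return [int(c[1]) for c, _ in picked], [pos for _, pos in picked]
-- ===== Notes on version B (the rewrite author's own statement) =====
-- stated objective: alternative
-- what changed: Replaces A's single interleaved loop (mutating cycle and appending inline) by a prefix-table-then-select pipeline: first build the cumulative cycle positions, then zip with the commands and select the addx rows.
import Mathlib
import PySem

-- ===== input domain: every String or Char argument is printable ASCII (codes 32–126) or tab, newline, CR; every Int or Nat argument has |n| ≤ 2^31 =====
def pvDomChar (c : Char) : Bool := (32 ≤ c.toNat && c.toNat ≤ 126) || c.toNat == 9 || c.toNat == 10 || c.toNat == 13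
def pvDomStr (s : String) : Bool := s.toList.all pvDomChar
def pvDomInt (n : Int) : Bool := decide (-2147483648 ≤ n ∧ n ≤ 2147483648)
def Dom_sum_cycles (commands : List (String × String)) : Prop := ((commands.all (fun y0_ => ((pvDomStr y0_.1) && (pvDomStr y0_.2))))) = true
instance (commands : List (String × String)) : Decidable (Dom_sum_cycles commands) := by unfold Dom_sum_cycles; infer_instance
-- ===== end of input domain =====

-- B replaces A's interleaved accumulation with a prefix-table-then-select pipeline (objective: alternative decomposition, same cost).

-- ===== PORT A =====
-- state = (sum_cycle, N, cycle), exactly A's loop body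
def sum_cycles_step (st : List Int × List Int × Int) (c : String × String) : List Int × List Int × Int :=
  let st :=
    if c.1 == "addx" then
      let cycle := st.2.2 + 2
      (st.1 ++ [cycle], st.2.1 ++ [(PySem.Int.ofStr? c.2).getD 0], cycle)
    else st
  if c.1 == "noop" then (st.1, st.2.1, st.2.2 + 1) else st

def sum_cycles (commands : List (String × String)) : List Int × List Int :=
  let s := commands.foldl sum_cycles_step ([], [], 1)
  (s.2.1, s.1)

-- ===== PORT B =====
-- cum[-1] is PySem.List.pyGetD … (-1); cum starts as [1] so it is never empty
def sum_cycles_alt_step (acc : List Int) (c : String × String) : List Int :=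
  acc ++ [PySem.List.pyGetD acc (-1) 0 +
    (if c.1 == "addx" then 2 else if c.1 == "noop" then 1 else 0)]

def sum_cycles_alt (commands : List (String × String)) : List Int × List Int :=
  let cum := commands.foldl sum_cycles_alt_step [1]
  let picked := (commands.zip (cum.drop 1)).filter (fun p => p.1.1 == "addx")
  (picked.map (fun p => (PySem.Int.ofStr? p.1.2).getD 0), picked.map (fun p => p.2))

-- ===== PRECONDITION & SPEC =====
-- Pre_ excludes exactly the inputs where Python's int(c[1]) raises ValueError on an 'addx' command (both A and B raise there).
def Pre_sum_cycles (commands : List (String × String)) : Prop :=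
  (commands.all (fun c => c.1 != "addx" || (PySem.Int.ofStr? c.2).isSome)) = true
instance (commands : List (String × String)) : Decidable (Pre_sum_cycles commands) := by unfold Pre_sum_cycles; infer_instance
def pvWitness_sum_cycles : (List (String × String)) := [("addx", "3"), ("noop", ""), ("addx", "-12")]
def Spec_sum_cycles (commands : List (String × String)) (out : List Int × List Int) : Prop := out = sum_cycles_alt commands
instance (commands : List (String × String)) (out : List Int × List Int) : Decidable (Spec_sum_cycles commands out) := by unfold Spec_sum_cycles; infer_instance

-- ===== CLAIM (what is proved, stated in full; the proofs are below) =====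
def Claim_equal_sum_cycles : Prop := ∀ (commands : List (String × String)), Dom_sum_cycles commands → Pre_sum_cycles commands → Spec_sum_cycles commands (sum_cycles commands)

-- ===== LEMMAS AND PROOFS =====

-- proof-side reference functions
def pvStep (c : String × String) : Int :=
  if c.1 == "addx" then 2 else if c.1 == "noop" then 1 else 0

def pvN : List (String × String) → List Int
  | [] => []
  | c :: rest => (if c.1 == "addx" then [(PySem.Int.ofStr? c.2).getD 0] else []) ++ pvN rest

def pvC (k : Int) : List (String × String) → List Int
  | [] => []
  | c :: rest => (if c.1 == "addx" then [k + pvStep c] else []) ++ pvC (k + pvStep c) rest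

def pvCum (k : Int) : List (String × String) → List Int
  | [] => []
  | c :: rest => (k + pvStep c) :: pvCum (k + pvStep c) rest

lemma stepA_eq (st : List Int × List Int × Int) (c : String × String) :
    sum_cycles_step st c =
      (st.1 ++ (if c.1 == "addx" then [st.2.2 + pvStep c] else []),
       st.2.1 ++ (if c.1 == "addx" then [(PySem.Int.ofStr? c.2).getD 0] else []),
       st.2.2 + pvStep c) := by
  by_cases h : c.1 = "addx"
  · simp [sum_cycles_step, pvStep, h]
  · by_cases h2 : c.1 = "noop" <;> simp [sum_cycles_step, pvStep, h, h2]

lemma foldA_eq (cmds : List (String × String)) :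
    ∀ (sc N : List Int) (k : Int),
      cmds.foldl sum_cycles_step (sc, N, k)
      = (sc ++ pvC k cmds, N ++ pvN cmds, k + (cmds.map pvStep).sum) := by
  induction cmds with
  | nil => intro sc N k; simp [pvC, pvN]
  | cons c rest ih =>
    intro sc N k
    rw [List.foldl_cons, stepA_eq, ih]
    by_cases h : c.1 = "addx" <;>
      simp [pvC, pvN, h] <;> ring

lemma foldB_eq (cmds : List (String × String)) :
    ∀ (pre : List Int) (k : Int),
      cmds.foldl sum_cycles_alt_step (pre ++ [k]) = (pre ++ [k]) ++ pvCum k cmds := by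
  induction cmds with
  | nil => intro pre k; simp [pvCum]
  | cons c rest ih =>
    intro pre k
    have hstep : sum_cycles_alt_step (pre ++ [k]) c = (pre ++ [k]) ++ [k + pvStep c] := by
      simp [sum_cycles_alt_step, PySem.List.pyGetD_neg_one_append_singleton, pvStep]
    rw [List.foldl_cons, hstep, ih (pre ++ [k]) (k + pvStep c), pvCum]
    simp

lemma zip_cum_N (cmds : List (String × String)) :
    ∀ k : Int,
      ((cmds.zip (pvCum k cmds)).filter (fun p => p.1.1 == "addx")).map
        (fun p => (PySem.Int.ofStr? p.1.2).getD 0) = pvN cmds := by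
  induction cmds with
  | nil => intro k; simp [pvN]
  | cons c rest ih =>
    intro k
    by_cases h : c.1 = "addx" <;> simp [pvCum, pvN, h, ih]

lemma zip_cum_C (cmds : List (String × String)) :
    ∀ k : Int,
      ((cmds.zip (pvCum k cmds)).filter (fun p => p.1.1 == "addx")).map
        (fun p => p.2) = pvC k cmds := by
  induction cmds with
  | nil => intro k; simp [pvC]
  | cons c rest ih =>
    intro k
    by_cases h : c.1 = "addx" <;> simp [pvCum, pvC, h, ih]

lemma altB_eq (cmds : List (String × String)) :
    sum_cycles_alt cmds = (pvN cmds, pvC 1 cmds) := by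
  unfold sum_cycles_alt
  have hcum := foldB_eq cmds [] 1
  simp only [List.nil_append] at hcum
  rw [hcum]
  simp only [List.cons_append, List.nil_append, List.drop_one, List.tail_cons]
  rw [zip_cum_N, zip_cum_C]

-- ===== VERDICT (by name: the statement is the Claim_ definition above) =====
theorem sum_cycles_spec : Claim_equal_sum_cycles := by
  intro commands _ _
  unfold Spec_sum_cycles sum_cycles
  rw [altB_eq]
  simp only [foldA_eq commands [] [] 1, List.nil_append]
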